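-- pv_equiv track=rewrite | github.com/justinux75/BlindTeX | BlindTeX/iotools/stringtools.py | cleanDelimiters
-- ===== SOURCE A (Python) =====
-- delimiters = [r'\(', r'\)', r'\[', r'\]', r'\begin{equation}',r'\begin{equation*}',r'\begin{align}',r'\begin{align*}',r'\begin{flalign}', r'\end{flalign}', r'\begin{flalign*}', r'\end{flalign*}', r'\end{equation}',r'\end{equation*}',r'\end{align}',r'\end{align*}',r'\begin{eqnarray}', r'\begin{eqnarray*}', r'\end{eqnarray}', r'\end{eqnarray*}',]
--
-- def cleanDelimiters(equation):
-- 	'''This method clean a string from the possible LaTeX equation delimiters to avoid future conflicts.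
-- 		Args:
-- 			equation(str): The LaTeX equation.
-- 		Returns
-- 			str: The same equation without the delimiters in the delimiters list. '''
-- 	newEquation = equation
-- 	if(newEquation[0] == '$'):
-- 	#This part is for the case with delimiters $ or $$, since in the equation could be a \$ we did this to avoid cleaning those to.
-- 		newEquation = newEquation[1:len(newEquation)-1]
-- 		#Already cleaned the first and last $ if there is other we pass the cleaner again.
-- 		return cleanDelimiters(newEquation)
-- 	else:
-- 		for delim in delimiters:
-- 			newEquation = newEquation.replace(delim, '')
-- 		return newEquation
-- ===== SOURCE B (Python) =====
-- delimiters = [r'\(', r'\)', r'\[', r'\]', r'\begin{equation}',r'\begin{equation*}',r'\begin{align}',r'\begin{align*}',r'\begin{flalign}', r'\end{flalign}', r'\begin{flalign*}', r'\end{flalign*}', r'\end{equation}',r'\end{equation*}',r'\end{align}',r'\end{align*}',r'\begin{eqnarray}', r'\begin{eqnarray*}', r'\end{eqnarray}', r'\end{eqnarray*}',]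
--
-- def cleanDelimiters(equation):
-- 	'''Strip the leading run of '$' signs together with as many characters from
-- 	the end in one slice, then delete every textual delimiter.'''
-- 	p = len(equation) - len(equation.lstrip('$'))
-- 	newEquation = equation[p:len(equation) - p]
-- 	for delim in delimiters:
-- 		newEquation = newEquation.replace(delim, '')
-- 	return newEquation
-- ===== Notes on version B (the rewrite author's own statement) =====
-- stated objective: simpler
-- what changed: Replaces A's self-recursion (one $-pair peeled per recursive call) by counting the leading '$' run once and removing all pairs with a single slice before the delimiter replacements.
-- outside the precondition, e.g. on cleanDelimiters('$'): A raises IndexError, B returns ''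
import Mathlib
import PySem

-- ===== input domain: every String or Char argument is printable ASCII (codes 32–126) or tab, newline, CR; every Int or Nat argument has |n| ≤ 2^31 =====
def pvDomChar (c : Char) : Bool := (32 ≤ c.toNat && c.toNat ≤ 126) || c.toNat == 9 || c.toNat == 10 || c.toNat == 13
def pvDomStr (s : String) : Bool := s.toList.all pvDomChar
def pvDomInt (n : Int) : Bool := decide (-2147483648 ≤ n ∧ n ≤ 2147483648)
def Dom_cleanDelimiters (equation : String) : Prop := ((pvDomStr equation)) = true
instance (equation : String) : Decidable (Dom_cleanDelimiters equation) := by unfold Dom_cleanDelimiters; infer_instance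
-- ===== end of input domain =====

-- B peels all leading '$' pairs with one counted slice instead of A's one-pair-per-call recursion (objective: simpler).

-- ===== PORT A =====
def delimiters : List String := ["\\(", "\\)", "\\[", "\\]", "\\begin{equation}", "\\begin{equation*}", "\\begin{align}", "\\begin{align*}", "\\begin{flalign}", "\\end{flalign}", "\\begin{flalign*}", "\\end{flalign*}", "\\end{equation}", "\\end{equation*}", "\\end{align}", "\\end{align*}", "\\begin{eqnarray}", "\\begin{eqnarray*}", "\\end{eqnarray}", "\\end{eqnarray*}"]

-- A on lists of chars: `equation[0] == '$'` (IndexError on [] — excluded by Pre_; there the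
-- condition is false and the replace loop returns [] as junk), peel `s[1:len(s)-1]`, recurse;
-- otherwise run the replace loop over the delimiters.
def cleanDelimitersC (s : List Char) : List Char :=
  if h : PySem.List.pyGet? s 0 = some '$' then
    cleanDelimitersC (PySem.List.slice s (some 1) (some (PySem.List.len s - 1)))
  else
    delimiters.foldl (fun t d => PySem.Chars.replace t d.toList []) s
termination_by s.length
decreasing_by
  cases s with
  | nil => exact absurd h (by decide)
  | cons a t =>
      rw [PySem.List.length_slice]
      have h1 : PySem.List.len (a :: t) - 1 = ((t.length : Nat) : Int) := by
        simp only [PySem.List.len_eq, List.length_cons]; push_cast; ring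
      rw [h1, PySem.List.clampIdx_natCast]
      simp [PySem.List.clampIdx]

def cleanDelimiters (equation : String) : String :=
  String.ofList (cleanDelimitersC equation.toList)

-- ===== PORT B =====
def cleanDelimitersAltC (s : List Char) : List Char :=
  -- p = len(equation) - len(equation.lstrip('$')) : hand port, exact — the length of the leading '$' run
  let p : Nat := (s.takeWhile (fun c => c == '$')).length
  let core := PySem.List.slice s (some (p : Int)) (some (PySem.List.len s - (p : Int)))
  delimiters.foldl (fun t d => PySem.Chars.replace t d.toList []) core

def cleanDelimiters_alt (equation : String) : String :=
  String.ofList (cleanDelimitersAltC equation.toList)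

-- ===== PRECONDITION & SPEC =====
-- Pre_ excludes exactly the strings on which A raises IndexError: those whose leading run of
-- '$' signs covers at least half of the string (in particular the empty string).
def Pre_cleanDelimiters (equation : String) : Prop :=
  2 * (equation.toList.takeWhile (fun c => c == '$')).length < equation.toList.length
instance (equation : String) : Decidable (Pre_cleanDelimiters equation) := by
  unfold Pre_cleanDelimiters; infer_instance
def pvWitness_cleanDelimiters : String := "$x + y$"

def Spec_cleanDelimiters (equation : String) (out : String) : Prop := out = cleanDelimiters_alt equation
instance (equation : String) (out : String) : Decidable (Spec_cleanDelimiters equation out) := by unfold Spec_cleanDelimiters; infer_instance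

-- ===== CLAIM (what is proved, stated in full; the proofs are below) =====
def Claim_equal_cleanDelimiters : Prop := ∀ (equation : String), Dom_cleanDelimiters equation → Pre_cleanDelimiters equation → Spec_cleanDelimiters equation (cleanDelimiters equation)

-- ===== LEMMAS AND PROOFS =====

-- one unfolding step of A's recursion, peeling branch
lemma peel_step (s : List Char) (h : PySem.List.pyGet? s 0 = some '$') :
    cleanDelimitersC s = cleanDelimitersC (PySem.List.slice s (some 1) (some (PySem.List.len s - 1))) := by
  rw [cleanDelimitersC, dif_pos h]

-- one unfolding step of A's recursion, replace-loop branch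
lemma stop_step (s : List Char) (h : ¬ PySem.List.pyGet? s 0 = some '$') :
    cleanDelimitersC s = delimiters.foldl (fun t d => PySem.Chars.replace t d.toList []) s := by
  rw [cleanDelimitersC, dif_neg h]

-- B's port with its lets zeta-reduced
lemma altC_eq (s : List Char) :
    cleanDelimitersAltC s = delimiters.foldl (fun t d => PySem.Chars.replace t d.toList [])
      (PySem.List.slice s (some ((s.takeWhile (fun c => c == '$')).length : Int))
        (some (PySem.List.len s - ((s.takeWhile (fun c => c == '$')).length : Int)))) := rfl

-- B's core slice as drop/take
lemma core_eq (s : List Char) (q : Nat) (hq : q ≤ s.length) :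
    PySem.List.slice s (some (q : Int)) (some (PySem.List.len s - (q : Int)))
      = List.take (s.length - 2 * q) (List.drop q s) := by
  have h0 : (0 : Int) ≤ (q : Int) := by positivity
  have h1 : (0 : Int) ≤ PySem.List.len s - (q : Int) := by
    simp only [PySem.List.len_eq]; omega
  rw [PySem.List.slice_toNat s h0 h1]
  have h2 : ((PySem.List.len s - (q : Int))).toNat = s.length - q := by
    simp only [PySem.List.len_eq]; omega
  rw [h2, Int.toNat_natCast]
  congr 1
  omega

-- takeWhile only looks at the run: taking at least the whole run changes nothing
lemma takeWhile_take_of_le {α : Type} (P : α → Bool) :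
    ∀ (l : List α) (k : Nat), (l.takeWhile P).length ≤ k →
      (l.take k).takeWhile P = l.takeWhile P := by
  intro l
  induction l with
  | nil => intro k _; simp
  | cons a t ih =>
      intro k h
      cases hPa : P a with
      | true =>
          simp only [List.takeWhile_cons, hPa, if_true, List.length_cons] at h ⊢
          cases k with
          | zero => omega
          | succ k' =>
              simp only [List.take_succ_cons, List.takeWhile_cons, hPa, if_true]
              rw [ih k' (by omega)]
      | false =>
          cases k with
          | zero => simp [hPa]
          | succ k' => simp [hPa]

set_option maxHeartbeats 1000000 in
lemma mainAux : ∀ (n : Nat) (s : List Char), s.length ≤ n →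
    2 * (s.takeWhile (fun c => c == '$')).length < s.length →
    cleanDelimitersC s = cleanDelimitersAltC s := by
  intro n
  induction n with
  | zero => intro s hle hlt; omega
  | succ n ih =>
      intro s hle hlt
      cases s with
      | nil => simp at hlt
      | cons c rest =>
          by_cases hc : c = '$'
          · subst hc
            simp only [List.length_cons] at hle
            have htw : List.takeWhile (fun c => c == '$') ('$' :: rest)
                = '$' :: List.takeWhile (fun c => c == '$') rest := by
              simp
            rw [htw] at hlt
            simp only [List.length_cons] at hlt
            set q := (List.takeWhile (fun c => c == '$') rest).length with hqdef
            have hqle : q ≤ rest.length := (List.takeWhile_prefix _).length_le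
            have hlt2 : 2 * q + 1 < rest.length := by omega
            rw [peel_step _ (by rw [PySem.List.pyGet?_zero_cons])]
            have hsl : PySem.List.slice ('$' :: rest) (some 1) (some (PySem.List.len ('$' :: rest) - 1))
                = rest.take (rest.length - 1) := by
              have hb : (0 : Int) ≤ PySem.List.len ('$' :: rest) - 1 := by
                simp only [PySem.List.len_eq, List.length_cons]; omega
              rw [PySem.List.slice_toNat _ (by omega) hb]
              have h3 : (PySem.List.len ('$' :: rest) - 1).toNat = rest.length := by
                simp only [PySem.List.len_eq, List.length_cons]; omega
              rw [h3]
              simp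
            rw [hsl]
            have htw' : ((rest.take (rest.length - 1)).takeWhile (fun c => c == '$')).length = q := by
              rw [takeWhile_take_of_le _ rest _ (by omega)]
            have hrec := ih (rest.take (rest.length - 1))
              (by simp [List.length_take]; omega)
              (by rw [htw']; simp [List.length_take]; omega)
            rw [hrec, altC_eq, altC_eq]
            congr 1
            rw [htw', htw]
            simp only [List.length_cons]
            rw [core_eq _ (q + 1) (by simp only [List.length_cons]; omega),
                core_eq _ q (by simp only [List.length_take]; omega)]
            simp only [List.length_cons, List.length_take, List.drop_succ_cons, List.drop_take,
              List.take_take]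
            congr 1
            omega
          · rw [stop_step _ (by simp [hc]), altC_eq]
            congr 1
            have h0 : ((c :: rest).takeWhile (fun c => c == '$')).length = 0 := by
              simp [hc]
            rw [h0, core_eq _ 0 (by omega)]
            simp

-- ===== VERDICT (by name: the statement is the Claim_ definition above) =====
theorem cleanDelimiters_spec : Claim_equal_cleanDelimiters := by
  intro equation _ hpre
  unfold Spec_cleanDelimiters cleanDelimiters cleanDelimiters_alt
  unfold Pre_cleanDelimiters at hpre
  rw [mainAux equation.toList.length equation.toList (le_refl _) hpre]
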